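-- pv_equiv track=rewrite | github.com/MrOiseau/advanced_ml | frontend/app.py | highlight_common_sequences
-- ===== SOURCE A (Python) =====
-- def highlight_common_sequences(text, common_sequences, color_map):
--     """
--     Highlight common sequences in the text with their assigned colors.
--     The function first finds all match intervals (non-overlapping) for the provided sequences
--     (case-insensitively) and then reconstructs the text with HTML spans inserted.
--
--     Args:
--         text (str): Text to highlight.
--         common_sequences (list): List of sequences to highlight.
--         color_map (dict): Mapping of sequences to their colors.
--
--     Returns:
--         str: HTML-formatted text with highlights.
--     """
--     if not common_sequences:
--         return text
--
--     # List to hold all found match intervals: (start_index, end_index, color)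
--     intervals = []
--     lower_text = text.lower()
--
--     # Process each sequence (prioritizing longer ones by sorting them)
--     for seq in sorted(common_sequences, key=lambda s: -len(s)):
--         seq_lower = seq.lower().strip()
--         if not seq_lower:
--             continue
--         start = 0
--         while True:
--             idx = lower_text.find(seq_lower, start)
--             if idx == -1:
--                 break
--             end = idx + len(seq_lower)
--             # Add the interval if it does not overlap an already recorded interval.
--             overlap = any(not (end <= existing[0] or idx >= existing[1]) for existing in intervals)
--             if not overlap:
--                 intervals.append((idx, end, color_map[seq]))
--             start = idx + 1
--
--     # Sort intervals by their starting position
--     intervals.sort(key=lambda x: x[0])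
--
--     # Rebuild the highlighted text by iterating over intervals
--     highlighted_text = ""
--     last_index = 0
--     for start, end, color in intervals:
--         # Append unchanged text between the last match and current match
--         highlighted_text += text[last_index:start]
--         # Append highlighted match
--         highlighted_text += f'<span style="background-color: {color};">{text[start:end]}</span>'
--         last_index = end
--     # Append any remaining text after the last match
--     highlighted_text += text[last_index:]
--
--     return highlighted_text
-- ===== SOURCE B (Python) =====
-- def highlight_common_sequences(text, common_sequences, color_map):
--     """Occupancy-array re-implementation: overlap checks via a boolean
--     occupancy array and rebuild via a start->(end,color) map walk (no
--     interval list, no interval sort)."""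
--     if not common_sequences:
--         return text
--     n = len(text)
--     lower_text = text.lower()
--     occupied = [False] * n
--     starts = {}
--     for seq in sorted(common_sequences, key=lambda s: -len(s)):
--         seq_lower = seq.lower().strip()
--         if not seq_lower:
--             continue
--         start = 0
--         while True:
--             idx = lower_text.find(seq_lower, start)
--             if idx == -1:
--                 break
--             end = idx + len(seq_lower)
--             if not any(occupied[idx:end]):
--                 occupied[idx:end] = [True] * (end - idx)
--                 starts[idx] = (end, color_map[seq])
--             start = idx + 1
--     out = ""
--     i = 0
--     while i < n:
--         if i in starts:
--             end, color = starts[i]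
--             out += f'<span style="background-color: {color};">{text[i:end]}</span>'
--             i = end
--         else:
--             out += text[i]
--             i += 1
--     return out
-- ===== Notes on version B (the rewrite author's own statement) =====
-- stated objective: alternative
-- what changed: Replaces A's per-candidate scan of all recorded intervals by a boolean occupancy array over text positions, and rebuilds the output by walking positions with a start->(end,color) map instead of sorting an interval list.
import Mathlib
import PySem

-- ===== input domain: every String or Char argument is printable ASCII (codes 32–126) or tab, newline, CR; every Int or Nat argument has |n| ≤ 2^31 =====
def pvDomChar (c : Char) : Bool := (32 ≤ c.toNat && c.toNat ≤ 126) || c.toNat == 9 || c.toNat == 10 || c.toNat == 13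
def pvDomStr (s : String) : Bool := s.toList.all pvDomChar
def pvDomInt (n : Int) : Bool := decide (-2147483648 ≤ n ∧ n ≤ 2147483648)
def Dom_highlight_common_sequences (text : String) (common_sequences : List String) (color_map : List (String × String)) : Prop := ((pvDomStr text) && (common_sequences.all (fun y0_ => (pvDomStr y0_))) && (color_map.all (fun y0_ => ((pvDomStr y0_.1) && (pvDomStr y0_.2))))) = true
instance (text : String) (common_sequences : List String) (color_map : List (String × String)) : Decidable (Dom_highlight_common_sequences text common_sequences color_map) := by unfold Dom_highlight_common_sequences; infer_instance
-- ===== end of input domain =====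

-- B replaces A's scan of all recorded intervals per candidate match by a boolean occupancy
-- array over text positions, and rebuilds the text by walking positions with a start→(end,color)
-- map instead of sorting an interval list (objective: alternative algorithm/data structure).

-- ===== PORT A =====
def pvA_span (color : String) (seg : List Char) : List Char :=
  ("<span style=\"background-color: ".toList) ++ color.toList ++ (";\">".toList) ++ seg ++ ("</span>".toList)

-- the inner `while True: idx = lower_text.find(seq_lower, start) …` loop; fuel ≥ len(text)+1
-- covers every iteration Python performs (start strictly increases and stays ≤ len(text)).
def pvA_find_loop (lt sl : List Char) (color : String) :
    Nat → Nat → List (Nat × Nat × String) → List (Nat × Nat × String)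
  | 0, _, ivs => ivs
  | fuel+1, start, ivs =>
    let idx := PySem.Chars.findFrom lt sl (start : Int) none
    if idx = -1 then ivs
    else
      let i := idx.toNat
      let e := i + sl.length
      let overlap := ivs.any (fun ex => !(decide (e ≤ ex.1) || decide (ex.2.1 ≤ i)))
      pvA_find_loop lt sl color fuel (i+1) (if overlap then ivs else ivs ++ [(i, e, color)])

-- the `for start, end, color in intervals:` rebuild loop (state: highlighted_text, last_index)
def pvA_rebuild (t : List Char) : List (Nat × Nat × String) → List Char × Nat → List Char × Nat
  | [], acc => acc
  | iv :: rest, (acc, last) =>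
      pvA_rebuild t rest
        (acc ++ PySem.List.slice t (some (last : Int)) (some (iv.1 : Int))
             ++ pvA_span iv.2.2 (PySem.List.slice t (some (iv.1 : Int)) (some (iv.2.1 : Int))),
         iv.2.1)

-- color_map[seq] is looked up via the dict built from the association list; under
-- Pre_ the key is present wherever Python performs the lookup, so getD "" is exact there.
def highlight_common_sequences (text : String) (common_sequences : List String) (color_map : List (String × String)) : String :=
  if common_sequences = [] then text else
  let t := text.toList
  let lt := PySem.Chars.lower t
  let cm := PySem.Dict.ofList color_map
  let intervals := (PySem.List.sorted common_sequences (fun s => -(s.toList.length : Int))).foldl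
    (fun ivs seq =>
      let sl := PySem.Chars.strip (PySem.Chars.lower seq.toList)
      if sl = [] then ivs
      else pvA_find_loop lt sl ((cm.get? seq).getD "") (t.length + 1) 0 ivs) []
  let sortedIvs := PySem.List.sorted intervals (fun iv => iv.1)
  let r := pvA_rebuild t sortedIvs ([], 0)
  String.ofList (r.1 ++ PySem.List.slice t (some (r.2 : Int)) none)

-- ===== PORT B =====
-- occupied[i:e] = [True] * (e - i): exact for Python's same-length slice assignment
-- (here always 0 ≤ i ≤ e ≤ len(occupied)).
def pvB_mark (occ : List Bool) (i e : Nat) : List Bool :=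
  occ.take i ++ List.replicate (e - i) true ++ occ.drop e

-- the inner while loop of B: state is (occupied, starts)
def pvB_find_loop (lt sl : List Char) (color : String) :
    Nat → Nat → List Bool × PySem.Dict Nat (Nat × String) → List Bool × PySem.Dict Nat (Nat × String)
  | 0, _, st => st
  | fuel+1, start, st =>
    let idx := PySem.Chars.findFrom lt sl (start : Int) none
    if idx = -1 then st
    else
      let i := idx.toNat
      let e := i + sl.length
      pvB_find_loop lt sl color fuel (i+1)
        (if (PySem.List.slice st.1 (some (i : Int)) (some (e : Int))).any (fun b => b)
         then st
         else (pvB_mark st.1 i e, st.2.insert i (e, color)))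

-- the `while i < n:` rebuild walk; fuel ≥ n covers every iteration (i strictly increases).
def pvB_build (t : List Char) (starts : PySem.Dict Nat (Nat × String)) :
    Nat → Nat → List Char → List Char
  | 0, _, out => out
  | fuel+1, i, out =>
    if i < t.length then
      match starts.get? i with
      | some ec =>
          pvB_build t starts fuel ec.1
            (out ++ (("<span style=\"background-color: ".toList) ++ ec.2.toList ++ (";\">".toList)
              ++ PySem.List.slice t (some (i : Int)) (some (ec.1 : Int)) ++ ("</span>".toList)))
      | none => pvB_build t starts fuel (i+1) (out ++ [PySem.List.pyGetD t (i : Int) ' '])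
    else out

def highlight_common_sequences_alt (text : String) (common_sequences : List String) (color_map : List (String × String)) : String :=
  if common_sequences = [] then text else
  let t := text.toList
  let n := t.length
  let lt := PySem.Chars.lower t
  let cm := PySem.Dict.ofList color_map
  let st := (PySem.List.sorted common_sequences (fun s => -(s.toList.length : Int))).foldl
    (fun st seq =>
      let sl := PySem.Chars.strip (PySem.Chars.lower seq.toList)
      if sl = [] then st
      else pvB_find_loop lt sl ((cm.get? seq).getD "") (n + 1) 0 st)
    (List.replicate n false, PySem.Dict.empty)
  String.ofList (pvB_build t st.2 n 0 [])

-- ===== PRECONDITION & SPEC =====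
-- Pre_ excludes the inputs on which Python's color_map[seq] raises KeyError: every sequence
-- whose lowered-and-stripped form is non-empty and occurs in the lowered text must be a key of
-- color_map.  This is slightly narrower than A's exact raise set (A skips the lookup when every
-- occurrence of such a sequence is already overlapped by a longer match) — see claim cites.
def Pre_highlight_common_sequences (text : String) (common_sequences : List String) (color_map : List (String × String)) : Prop :=
  ∀ s ∈ common_sequences,
    PySem.Chars.strip (PySem.Chars.lower s.toList) ≠ [] →
    PySem.Chars.isIn (PySem.Chars.strip (PySem.Chars.lower s.toList)) (PySem.Chars.lower text.toList) = true →
    ((PySem.Dict.ofList color_map).get? s).isSome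
instance (text : String) (common_sequences : List String) (color_map : List (String × String)) : Decidable (Pre_highlight_common_sequences text common_sequences color_map) := by unfold Pre_highlight_common_sequences; infer_instance

def pvWitness_highlight_common_sequences : String × List String × (List (String × String)) :=
  ("The cat sat", ["cat", "Sat"], [("cat", "red"), ("Sat", "blue")])

def Spec_highlight_common_sequences (text : String) (common_sequences : List String) (color_map : List (String × String)) (out : String) : Prop := out = highlight_common_sequences_alt text common_sequences color_map
instance (text : String) (common_sequences : List String) (color_map : List (String × String)) (out : String) : Decidable (Spec_highlight_common_sequences text common_sequences color_map out) := by unfold Spec_highlight_common_sequences; infer_instance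

-- ===== CLAIM (what is proved, stated in full; the proofs are below) =====
def Claim_equal_highlight_common_sequences : Prop := ∀ (text : String) (common_sequences : List String) (color_map : List (String × String)), Dom_highlight_common_sequences text common_sequences color_map → Pre_highlight_common_sequences text common_sequences color_map → Spec_highlight_common_sequences text common_sequences color_map (highlight_common_sequences text common_sequences color_map)

-- ===== LEMMAS AND PROOFS =====

-- the simulation invariant between A's interval list and B's (occupied, starts) state
def pvInv (n : Nat) (ivs : List (Nat × Nat × String)) (occ : List Bool) (d : PySem.Dict Nat (Nat × String)) : Prop :=
  occ.length = n ∧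
  (∀ k, occ.getD k false = true ↔ ∃ iv ∈ ivs, iv.1 ≤ k ∧ k < iv.2.1) ∧
  d.items = ivs.map (fun iv => (iv.1, (iv.2.1, iv.2.2))) ∧
  (∀ iv ∈ ivs, iv.1 < iv.2.1 ∧ iv.2.1 ≤ n) ∧
  ivs.Pairwise (fun a b => a.2.1 ≤ b.1 ∨ b.2.1 ≤ a.1)

-- the rendered text determined by a (sorted, disjoint) interval list
def pvRender (t : List Char) : Nat → List (Nat × Nat × String) → List Char
  | last, [] => t.drop last
  | last, iv :: rest =>
      (t.drop last).take (iv.1 - last) ++ pvA_span iv.2.2 ((t.drop iv.1).take (iv.2.1 - iv.1))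
        ++ pvRender t iv.2.1 rest

lemma pvMark_getD (occ : List Bool) (i e k : Nat) (hie : i ≤ e) (he : e ≤ occ.length) :
    (pvB_mark occ i e).getD k false
      = if i ≤ k ∧ k < e then true else occ.getD k false := by
  unfold pvB_mark
  rw [List.getD_eq_getElem?_getD, List.getD_eq_getElem?_getD]
  rcases lt_or_ge k e with h2 | h2
  · rw [List.getElem?_append_left (by simp; omega)]
    rcases lt_or_ge k i with h1 | h1
    · rw [List.getElem?_append_left (by simp; omega), if_neg (by omega), List.getElem?_take]
      simp [h1]
    · rw [List.getElem?_append_right (by simp; omega), if_pos ⟨h1, h2⟩]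
      rw [List.getElem?_replicate]
      simp only [List.length_take]
      rw [if_pos (by omega)]
      rfl
  · rw [List.getElem?_append_right (by simp; omega), if_neg (by omega)]
    simp only [List.length_append, List.length_take, List.length_replicate, List.getElem?_drop]
    congr 2
    omega

lemma pvAnyTake (occ : List Bool) (i e : Nat) :
    ((occ.drop i).take (e - i)).any (fun b => b) = true
      ↔ ∃ k, i ≤ k ∧ k < e ∧ occ.getD k false = true := by
  rw [List.any_eq_true]
  constructor
  · rintro ⟨x, hmem, hx⟩
    obtain ⟨j, hj, hval⟩ := List.mem_iff_getElem.mp hmem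
    have hj' : j < e - i ∧ i + j < occ.length := by
      simp only [List.length_take, List.length_drop] at hj; omega
    refine ⟨i + j, by omega, by omega, ?_⟩
    rw [List.getD_eq_getElem _ _ hj'.2]
    have : ((occ.drop i).take (e - i))[j] = occ[i + j] := by
      rw [List.getElem_take, List.getElem_drop]
    rw [← this, hval]
    simpa using hx
  · rintro ⟨k, h1, h2, h3⟩
    have hk : k < occ.length := by
      by_contra hk
      rw [List.getD_eq_default _ _ (by omega)] at h3
      simp at h3
    refine ⟨true, ?_, rfl⟩
    apply List.mem_iff_getElem.mpr
    refine ⟨k - i, by simp [List.length_take, List.length_drop]; omega, ?_⟩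
    rw [List.getElem_take, List.getElem_drop]
    have : i + (k - i) = k := by omega
    simp only [this]
    rw [List.getD_eq_getElem _ _ hk] at h3
    exact h3

lemma pvOverlap_eq (occ : List Bool) (ivs : List (Nat × Nat × String))
    (hocc : ∀ k, occ.getD k false = true ↔ ∃ iv ∈ ivs, iv.1 ≤ k ∧ k < iv.2.1)
    (hb : ∀ iv ∈ ivs, iv.1 < iv.2.1)
    (i e : Nat) (hie : i < e) :
    (PySem.List.slice occ (some (i : Int)) (some (e : Int))).any (fun b => b)
      = ivs.any (fun ex => !(decide (e ≤ ex.1) || decide (ex.2.1 ≤ i))) := by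
  rw [PySem.List.slice_natCast]
  rw [Bool.eq_iff_iff]
  rw [pvAnyTake, List.any_eq_true]
  constructor
  · rintro ⟨k, h1, h2, h3⟩
    obtain ⟨iv, hm, hc1, hc2⟩ := (hocc k).mp h3
    exact ⟨iv, hm, by simp; omega⟩
  · rintro ⟨ex, hm, hx⟩
    have hx' : ¬ e ≤ ex.1 ∧ ¬ ex.2.1 ≤ i := by simpa using hx
    have hbe := hb ex hm
    rcases le_total ex.1 i with hcase | hcase
    · exact ⟨i, le_rfl, by omega, (hocc _).mpr ⟨ex, hm, by omega, by omega⟩⟩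
    · exact ⟨ex.1, hcase, by omega, (hocc _).mpr ⟨ex, hm, le_rfl, by omega⟩⟩

lemma pvLoop_inv (lt sl : List Char) (c : String) (n : Nat) (hn : lt.length = n) (hsl : sl ≠ []) :
    ∀ fuel start ivs occ d, start ≤ n → pvInv n ivs occ d →
      pvInv n (pvA_find_loop lt sl c fuel start ivs)
        (pvB_find_loop lt sl c fuel start (occ, d)).1
        (pvB_find_loop lt sl c fuel start (occ, d)).2 := by
  intro fuel
  induction fuel with
  | zero => intro start ivs occ d _ h; simpa [pvA_find_loop, pvB_find_loop] using h
  | succ fuel ih =>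
      intro start ivs occ d hstart hinv
      by_cases hidx : PySem.Chars.findFrom lt sl (start : Int) none = -1
      · simpa [pvA_find_loop, pvB_find_loop, hidx] using hinv
      · obtain ⟨hlen, hocc, hitems, hbounds, hdisj⟩ := hinv
        obtain ⟨hge, hpre, -⟩ :=
          PySem.Chars.findFrom_natCast_spec lt sl start (by omega) hidx
        set idx := PySem.Chars.findFrom lt sl (start : Int) none with hidxdef
        set i := idx.toNat with hidef
        have hilen : sl.length ≤ lt.length - i := by
          have h := hpre.length_le
          simpa using h
        have hsl1 : 0 < sl.length := List.length_pos_iff.mpr hsl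
        have hin : i < n ∧ i + sl.length ≤ n := by omega
        simp only [pvA_find_loop, pvB_find_loop, ← hidxdef, ← hidef, ite_false,
          eq_false hidx]
        have hov :
            (PySem.List.slice occ (some (i : Int)) (some ((i + sl.length : Nat) : Int))).any (fun b => b)
              = ivs.any (fun ex => !(decide (i + sl.length ≤ ex.1) || decide (ex.2.1 ≤ i))) :=
          pvOverlap_eq occ ivs hocc (fun iv hm => (hbounds iv hm).1) i (i + sl.length) (by omega)
        rw [hov]
        by_cases hcase : ivs.any (fun ex => !(decide (i + sl.length ≤ ex.1) || decide (ex.2.1 ≤ i))) = true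
        · rw [if_pos hcase, if_pos hcase]
          exact ih (i+1) ivs occ d (by omega) ⟨hlen, hocc, hitems, hbounds, hdisj⟩
        · rw [if_neg hcase, if_neg hcase]
          have hnov : ∀ ex ∈ ivs, i + sl.length ≤ ex.1 ∨ ex.2.1 ≤ i := by
            intro ex hm
            have h0 : (ivs.any fun ex => !(decide (i + sl.length ≤ ex.1) || decide (ex.2.1 ≤ i)))
                = false := Bool.eq_false_iff.mpr hcase
            have h1 : ex.1 < i + sl.length → ex.2.1 ≤ i := by
              simpa using List.any_eq_false.mp h0 ex hm
            rcases le_or_gt (i + sl.length) ex.1 with hle | hgt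
            · exact Or.inl hle
            · exact Or.inr (h1 hgt)
          have hcont : d.contains i = false := by
            by_contra hc
            have hc' : d.contains i = true := by simpa using hc
            obtain ⟨p, hp, hpk⟩ : ∃ p ∈ d.items, p.1 = i := by
              simpa [PySem.Dict.contains, List.any_eq_true, beq_iff_eq] using hc'
            rw [hitems] at hp
            obtain ⟨iv, hiv, hmap⟩ := List.mem_map.mp hp
            have hkey : iv.1 = i := by rw [← hmap] at hpk; exact hpk
            have hb := hbounds iv hiv
            rcases hnov iv hiv with h | h <;> omega
          apply ih (i+1) _ _ _ (by omega)
          refine ⟨?_, ?_, ?_, ?_, ?_⟩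
          · unfold pvB_mark
            simp only [List.length_append, List.length_take, List.length_replicate,
              List.length_drop]
            omega
          · intro k
            rw [pvMark_getD occ i (i + sl.length) k (by omega) (by omega)]
            by_cases hk : i ≤ k ∧ k < i + sl.length
            · rw [if_pos hk]
              constructor
              · intro _
                exact ⟨(i, i + sl.length, c), by simp, by simpa using hk⟩
              · intro _; rfl
            · rw [if_neg hk, hocc k]
              constructor
              · rintro ⟨iv, hm, h1, h2⟩; exact ⟨iv, by simp [hm], h1, h2⟩
              · rintro ⟨iv, hm, h1, h2⟩
                rcases List.mem_append.mp hm with hm | hm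
                · exact ⟨iv, hm, h1, h2⟩
                · simp at hm
                  subst hm
                  simp at h1 h2
                  omega
          · simp only [PySem.Dict.insert, hcont, Bool.false_eq_true, ite_false]
            rw [hitems]
            simp
          · intro iv hm
            rcases List.mem_append.mp hm with hm | hm
            · exact hbounds iv hm
            · simp at hm; subst hm; constructor <;> simp <;> omega
          · rw [List.pairwise_append]
            refine ⟨hdisj, by simp, ?_⟩
            intro a ha b hb
            simp at hb
            subst hb
            rcases hnov a ha with h | h
            · right; simpa using h
            · left; simpa using h

lemma pvFold_inv (lt t : List Char) (n : Nat) (hn : lt.length = n) (ht : t.length = n)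
    (cm : PySem.Dict String String) :
    ∀ (seqs : List String) ivs occ d, pvInv n ivs occ d →
      pvInv n
        (seqs.foldl (fun ivs seq =>
          let sl := PySem.Chars.strip (PySem.Chars.lower seq.toList)
          if sl = [] then ivs
          else pvA_find_loop lt sl ((cm.get? seq).getD "") (t.length + 1) 0 ivs) ivs)
        (seqs.foldl (fun st seq =>
          let sl := PySem.Chars.strip (PySem.Chars.lower seq.toList)
          if sl = [] then st
          else pvB_find_loop lt sl ((cm.get? seq).getD "") (t.length + 1) 0 st) (occ, d)).1
        (seqs.foldl (fun st seq =>
          let sl := PySem.Chars.strip (PySem.Chars.lower seq.toList)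
          if sl = [] then st
          else pvB_find_loop lt sl ((cm.get? seq).getD "") (t.length + 1) 0 st) (occ, d)).2 := by
  intro seqs
  induction seqs with
  | nil => intro ivs occ d h; simpa using h
  | cons seq rest ih =>
      intro ivs occ d h
      simp only [List.foldl_cons]
      by_cases hsl : PySem.Chars.strip (PySem.Chars.lower seq.toList) = []
      · simp only [hsl, if_pos]
        simpa [hsl] using ih ivs occ d h
      · simp only [if_neg hsl]
        have h' := pvLoop_inv lt _ ((cm.get? seq).getD "") n hn hsl (t.length + 1) 0 ivs occ d
          (by omega) h
        have := ih _ (pvB_find_loop lt _ ((cm.get? seq).getD "") (t.length + 1) 0 (occ, d)).1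
          (pvB_find_loop lt _ ((cm.get? seq).getD "") (t.length + 1) 0 (occ, d)).2 h'
        simpa using this

lemma pvA_rebuild_eq (t : List Char) :
    ∀ ivs (acc : List Char) (last : Nat),
      (pvA_rebuild t ivs (acc, last)).1
        ++ PySem.List.slice t (some (((pvA_rebuild t ivs (acc, last)).2 : Nat) : Int)) none
      = acc ++ pvRender t last ivs := by
  intro ivs
  induction ivs with
  | nil =>
      intro acc last
      simp [pvA_rebuild, pvRender, PySem.List.slice_from_natCast]
  | cons iv rest ih =>
      intro acc last
      simp only [pvA_rebuild, pvRender, ih, PySem.List.slice_natCast]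
      simp [List.append_assoc]

lemma pvB_build_append (t : List Char) (d : PySem.Dict Nat (Nat × String)) :
    ∀ fuel i out, pvB_build t d fuel i out = out ++ pvB_build t d fuel i [] := by
  intro fuel
  induction fuel with
  | zero => intro i out; simp [pvB_build]
  | succ fuel ih =>
      intro i out
      simp only [pvB_build]
      by_cases hi : i < t.length
      · rw [if_pos hi, if_pos hi]
        cases hd : d.get? i with
        | some ec =>
            dsimp only
            rw [ih ec.1 (out ++ _), ih ec.1 ([] ++ _)]
            simp
        | none =>
            dsimp only
            rw [ih (i+1) (out ++ _), ih (i+1) ([] ++ _)]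
            simp
      · rw [if_neg hi, if_neg hi]
        simp

lemma pvFind?_eq_some (l : List (Nat × Nat × String)) (iv : Nat × Nat × String)
    (nd : (l.map (fun iv => iv.1)).Nodup) (hm : iv ∈ l) :
    l.find? (fun x => x.1 == iv.1) = some iv := by
  have hs : (l.find? (fun x => x.1 == iv.1)).isSome :=
    List.find?_isSome.mpr ⟨iv, hm, by simp⟩
  obtain ⟨y, hy⟩ := Option.isSome_iff_exists.mp hs
  have hym := List.mem_of_find?_eq_some hy
  have hyk : y.1 = iv.1 := by simpa using List.find?_some hy
  rw [hy]
  congr 1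
  exact List.inj_on_of_nodup_map nd hym hm hyk

lemma pvFind?_key_perm (l1 l2 : List (Nat × Nat × String)) (h : l1.Perm l2)
    (nd : (l1.map (fun iv => iv.1)).Nodup) (j : Nat) :
    l1.find? (fun iv => iv.1 == j) = l2.find? (fun iv => iv.1 == j) := by
  by_cases hex : ∃ iv ∈ l1, iv.1 = j
  · obtain ⟨iv, hm, hj⟩ := hex
    subst hj
    rw [pvFind?_eq_some l1 iv nd hm,
      pvFind?_eq_some l2 iv (((h.map (fun iv => iv.1)).nodup_iff).mp nd) (h.mem_iff.mp hm)]
  · rw [List.find?_eq_none.mpr, List.find?_eq_none.mpr]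
    · intro x hx; simp only [beq_iff_eq]; exact fun hj => hex ⟨x, h.mem_iff.mpr hx, hj⟩
    · intro x hx; simp only [beq_iff_eq]; exact fun hj => hex ⟨x, hx, hj⟩

lemma pvB_build_eq (t : List Char) (d : PySem.Dict Nat (Nat × String)) :
    ∀ fuel (ivs : List (Nat × Nat × String)) (i : Nat), t.length - i ≤ fuel →
      ivs.Pairwise (fun a b => a.2.1 ≤ b.1) →
      (∀ iv ∈ ivs, i ≤ iv.1 ∧ iv.1 < iv.2.1 ∧ iv.2.1 ≤ t.length) →
      (∀ j, i ≤ j → d.get? j = (ivs.find? (fun iv => iv.1 == j)).map (fun iv => (iv.2.1, iv.2.2))) →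
      pvB_build t d fuel i [] = pvRender t i ivs := by
  intro fuel
  induction fuel with
  | zero =>
      intro ivs i hfuel hchain hb hlook
      have hlen : t.length ≤ i := by omega
      have hivs : ivs = [] := by
        cases ivs with
        | nil => rfl
        | cons iv rest => exact absurd (hb iv (by simp)) (by omega)
      subst hivs
      simp [pvB_build, pvRender, List.drop_eq_nil_of_le hlen]
  | succ fuel ih =>
      intro ivs i hfuel hchain hb hlook
      by_cases hi : i < t.length
      · cases ivs with
        | nil =>
            have hd : d.get? i = none := by simpa using hlook i le_rfl
            simp only [pvB_build, if_pos hi, hd]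
            rw [pvB_build_append]
            rw [ih [] (i+1) (by omega) (by simp) (by simp) ?hl]
            case hl =>
              intro j hj
              simpa using hlook j (by omega)
            simp only [pvRender]
            rw [List.drop_eq_getElem_cons hi, PySem.List.pyGetD_natCast]
            simp only [List.nil_append, List.singleton_append, List.getD_eq_getElem t ' ' hi]
        | cons iv rest =>
            have hbiv := hb iv (by simp)
            by_cases hstart : iv.1 = i
            · have hd : d.get? i = some (iv.2.1, iv.2.2) := by
                rw [hlook i le_rfl]
                rw [List.find?_cons_of_pos (by simp [hstart])]
                rfl
              simp only [pvB_build, if_pos hi, hd]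
              rw [pvB_build_append]
              rw [ih rest iv.2.1 (by omega) (List.Pairwise.sublist (by simp) hchain) ?hbb ?hll]
              case hbb =>
                intro x hx
                have := (List.pairwise_cons.mp hchain).1 x hx
                have hbx := hb x (by simp [hx])
                exact ⟨this, hbx.2⟩
              case hll =>
                intro j hj
                rw [hlook j (by omega)]
                rw [List.find?_cons_of_neg (by simp; omega)]
              simp only [pvRender, hstart, PySem.List.slice_natCast]
              simp [pvA_span]
            · have hd : d.get? i = none := by
                rw [hlook i le_rfl]
                rw [List.find?_eq_none.mpr]
                · rfl
                · intro x hx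
                  simp only [beq_iff_eq]
                  rcases List.mem_cons.mp hx with hx | hx
                  · subst hx; omega
                  · have := (List.pairwise_cons.mp hchain).1 x hx
                    omega
              simp only [pvB_build, if_pos hi, hd]
              rw [pvB_build_append]
              rw [ih (iv :: rest) (i+1) (by omega) hchain ?hbb ?hll]
              case hbb =>
                intro x hx
                have hbx := hb x hx
                rcases List.mem_cons.mp hx with hx' | hx'
                · subst hx'; exact ⟨by omega, hbx.2⟩
                · have := (List.pairwise_cons.mp hchain).1 x hx'
                  exact ⟨by omega, hbx.2⟩
              case hll =>
                intro j hj
                exact hlook j (by omega)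
              simp only [pvRender]
              rw [List.drop_eq_getElem_cons hi]
              have hiv1 : iv.1 - i = (iv.1 - (i+1)) + 1 := by omega
              rw [hiv1, List.take_succ_cons, PySem.List.pyGetD_natCast]
              simp only [List.nil_append, List.cons_append,
                List.getD_eq_getElem t ' ' hi, List.append_assoc]
      · have hlen : t.length ≤ i := by omega
        have hivs : ivs = [] := by
          cases ivs with
          | nil => rfl
          | cons iv rest => exact absurd (hb iv (by simp)) (by omega)
        subst hivs
        simp [pvB_build, if_neg hi, pvRender, List.drop_eq_nil_of_le hlen]

-- ===== VERDICT (by name: the statement is the Claim_ definition above) =====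
theorem highlight_common_sequences_spec : Claim_equal_highlight_common_sequences := by
  intro text seqs cmap hdom hpre
  show highlight_common_sequences text seqs cmap = highlight_common_sequences_alt text seqs cmap
  by_cases h0 : seqs = []
  · simp [highlight_common_sequences, highlight_common_sequences_alt, h0]
  · rw [highlight_common_sequences, highlight_common_sequences_alt, if_neg h0, if_neg h0]
    set t := text.toList with ht
    have hlt : (PySem.Chars.lower t).length = t.length := by simp [PySem.Chars.lower]
    have hinv0 : pvInv t.length [] (List.replicate t.length false) PySem.Dict.empty := by
      refine ⟨by simp, ?_, by simp [PySem.Dict.empty], by simp, by simp⟩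
      intro k
      constructor
      · intro hk
        by_cases hkn : k < t.length
        · rw [List.getD_replicate _ hkn] at hk
          simp at hk
        · rw [List.getD_eq_default _ _ (by simp; omega)] at hk
          simp at hk
      · rintro ⟨iv, hm, -⟩
        simp at hm
    have H := pvFold_inv (PySem.Chars.lower t) t t.length hlt rfl (PySem.Dict.ofList cmap)
      (PySem.List.sorted seqs (fun s => -(s.toList.length : Int)))
      [] (List.replicate t.length false) PySem.Dict.empty hinv0
    obtain ⟨hlen, hocc, hitems, hbounds, hdisj⟩ := H
    dsimp only
    congr 1
    rw [pvA_rebuild_eq]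
    rw [List.nil_append]
    set ivs0 := ((PySem.List.sorted seqs fun s => -(s.toList.length : Int)).foldl (fun ivs seq =>
      let sl := PySem.Chars.strip (PySem.Chars.lower seq.toList)
      if sl = [] then ivs
      else pvA_find_loop (PySem.Chars.lower t) sl (((PySem.Dict.ofList cmap).get? seq).getD "")
        (t.length + 1) 0 ivs) []) with hivs0
    set stB := ((PySem.List.sorted seqs fun s => -(s.toList.length : Int)).foldl (fun st seq =>
      let sl := PySem.Chars.strip (PySem.Chars.lower seq.toList)
      if sl = [] then st
      else pvB_find_loop (PySem.Chars.lower t) sl (((PySem.Dict.ofList cmap).get? seq).getD "")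
        (t.length + 1) 0 st) (List.replicate t.length false, PySem.Dict.empty)) with hstB
    have hkeys : (ivs0.map (fun iv => iv.1)).Nodup := by
      simp only [List.Nodup, List.pairwise_map]
      refine hdisj.imp_of_mem ?_
      intro a b ha hb hr
      have h1 := hbounds a ha
      have h2 := hbounds b hb
      omega
    have hperm : (PySem.List.sorted ivs0 (fun iv => iv.1)).Perm ivs0 :=
      PySem.List.sorted_perm ivs0 (fun iv => iv.1) false
    have hd2 : (PySem.List.sorted ivs0 (fun iv => iv.1)).Pairwise
        (fun a b => a.2.1 ≤ b.1 ∨ b.2.1 ≤ a.1) :=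
      (List.Perm.pairwise_iff (fun h => h.symm) hperm).mpr hdisj
    have hkey : (PySem.List.sorted ivs0 (fun iv => iv.1)).Pairwise
        (fun a b => a.1 ≤ b.1) := PySem.List.sorted_pairwise ivs0 (fun iv => iv.1)
    have hchain : (PySem.List.sorted ivs0 (fun iv => iv.1)).Pairwise
        (fun a b => a.2.1 ≤ b.1) := by
      refine (hkey.and hd2).imp_of_mem ?_
      intro a b ha hb hr
      have h1 := hbounds a ((PySem.List.mem_sorted ivs0 _ _ a).mp ha)
      have h2 := hbounds b ((PySem.List.mem_sorted ivs0 _ _ b).mp hb)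
      omega
    have hb' : ∀ iv ∈ PySem.List.sorted ivs0 (fun iv => iv.1),
        0 ≤ iv.1 ∧ iv.1 < iv.2.1 ∧ iv.2.1 ≤ t.length := by
      intro iv hm
      have := hbounds iv ((PySem.List.mem_sorted ivs0 _ _ iv).mp hm)
      exact ⟨Nat.zero_le _, this.1, this.2⟩
    have hlook : ∀ j, 0 ≤ j → stB.2.get? j =
        ((PySem.List.sorted ivs0 (fun iv => iv.1)).find? (fun iv => iv.1 == j)).map
          (fun iv => (iv.2.1, iv.2.2)) := by
      intro j _
      have hg : stB.2.get? j = (stB.2.items.find? (fun p => p.1 == j)).map (fun p => p.2) := rfl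
      rw [hg, hitems, List.find?_map]
      simp only [Function.comp_def]
      rw [pvFind?_key_perm ivs0 (PySem.List.sorted ivs0 (fun iv => iv.1)) hperm.symm hkeys j]
      simp
    rw [pvB_build_eq t stB.2 t.length (PySem.List.sorted ivs0 (fun iv => iv.1)) 0 (by omega)
      hchain hb' hlook]
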